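-- pv_equiv track=rewrite | github.com/xLightless/uni-advanced-algorithms | longest_substring/test.py | longest_substring_with_k_repetitions
-- ===== SOURCE A (Python) =====
-- def longest_substring_with_k_repetitions(string, k):
--     # Initialize variables to store the start and end indices of the longest substring
--     start = 0
--     end = 0
--     max_length = 0
--     longest_substring = ""
--
--     # Dictionary to keep track of character counts in the current window
--     char_count = {}
--
--     while end < len(string):
--         # Add the character at the end index to the char_count dictionary
--         char_count[string[end]] = char_count.get(string[end], 0) + 1
--
--         # Move the end pointer forward
--         end += 1
--
--         # Check if all characters in the current window have counts equal to k
--         if all(count == k for count in char_count.values()):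
--             # Check if the current window is longer than the previously found longest substring
--             if end - start > max_length:
--                 max_length = end - start
--                 longest_substring = string[start:end]
--
--         # If any character count exceeds k, move the start pointer forward
--         # until all characters have counts less than or equal to k
--         while any(count > k for count in char_count.values()):
--             char_count[string[start]] -= 1
--             if char_count[string[start]] == 0:
--                 del char_count[string[start]]
--             start += 1
--
--     return longest_substring
-- ===== SOURCE B (Python) =====
-- def longest_substring_with_k_repetitions(string, k):
--     # Same greedy sliding window as A, but with counters maintained
--     # incrementally (O(1) per step) instead of rescanning all counts.
--     if k <= 0:
--         return ""
--     cnt = {}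
--     exact = 0          # number of distinct chars whose window count is exactly k
--     start = 0
--     best_start = 0
--     best_len = 0
--     for end, ch in enumerate(string):
--         c = cnt.get(ch, 0) + 1
--         cnt[ch] = c
--         if c == k:
--             exact += 1
--         elif c == k + 1:
--             exact -= 1
--         if exact == len(cnt) and end + 1 - start > best_len:
--             best_start = start
--             best_len = end + 1 - start
--         while cnt[ch] > k:
--             s = string[start]
--             sc = cnt[s] - 1
--             if sc == 0:
--                 del cnt[s]
--             else:
--                 cnt[s] = sc
--             if sc == k:
--                 exact += 1
--             elif sc == k - 1:
--                 exact -= 1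
--             start += 1
--     return string[best_start:best_start + best_len]
-- ===== Notes on version B (the rewrite author's own statement) =====
-- stated objective: faster
-- what changed: Replaces the per-step all()/any() rescans of the whole count dictionary with an incrementally maintained exactly-k counter and a targeted shrink on the single character that can exceed k, plus recording the best window by (start,len) instead of slicing eagerly.
import Mathlib
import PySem

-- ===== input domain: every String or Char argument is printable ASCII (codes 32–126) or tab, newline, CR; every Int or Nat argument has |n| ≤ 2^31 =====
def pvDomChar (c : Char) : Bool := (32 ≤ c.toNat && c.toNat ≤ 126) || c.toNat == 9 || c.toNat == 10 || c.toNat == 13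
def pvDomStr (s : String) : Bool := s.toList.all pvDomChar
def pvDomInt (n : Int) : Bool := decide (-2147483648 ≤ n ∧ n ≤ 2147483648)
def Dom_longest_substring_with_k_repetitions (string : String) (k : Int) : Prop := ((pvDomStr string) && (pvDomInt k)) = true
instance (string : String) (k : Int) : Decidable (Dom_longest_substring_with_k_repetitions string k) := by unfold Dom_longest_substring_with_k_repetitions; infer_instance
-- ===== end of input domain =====

-- B replaces A's per-step all()/any() rescans of the count dict by an incrementally
-- maintained exactly-k counter and a targeted shrink on the one char that can exceed k.

-- ===== PORT A =====
-- inner `while any(count > k ...): ...` loop of A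
def pvA_shrink (cs : List Char) (k : Int) (cc : PySem.Dict Char Int) (start : Nat) :
    PySem.Dict Char Int × Nat :=
  if (PySem.Dict.values cc).any (fun v => decide (k < v)) then
    match h1 : PySem.List.pyGet? cs (start : Int) with
    | none => (cc, start)        -- Python would raise IndexError here (never reached)
    | some s =>
      match PySem.Dict.get? cc s with
      | none => (cc, start)      -- Python would raise KeyError here (never reached)
      | some v =>
        let cc1 := PySem.Dict.insert cc s (v - 1)
        let cc2 := if v - 1 = 0 then PySem.Dict.erase cc1 s else cc1
        pvA_shrink cs k cc2 (start + 1)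
  else (cc, start)
termination_by cs.length - start
decreasing_by
  have hlt : start < cs.length := by
    by_contra hge
    rw [PySem.List.pyGet?_natCast, List.getElem?_eq_none (by omega)] at h1
    simp at h1
  omega

-- outer `while end < len(string):` loop of A
def pvA_loop (cs : List Char) (k : Int) (start endI : Nat) (maxLen : Int)
    (best : List Char) (cc : PySem.Dict Char Int) : List Char :=
  if h : endI < cs.length then
    match PySem.List.pyGet? cs (endI : Int) with
    | none => best               -- never reached: endI < len
    | some c =>
      let cc1 := PySem.Dict.insert cc c (PySem.Dict.getD cc c 0 + 1)
      let mb :=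
        if (PySem.Dict.values cc1).all (fun v => decide (v = k)) then
          if maxLen < ((endI : Int) + 1) - (start : Int) then
            ((((endI : Int) + 1) - (start : Int)),
             PySem.List.slice cs (some (start : Int)) (some ((endI : Int) + 1)))
          else (maxLen, best)
        else (maxLen, best)
      let p := pvA_shrink cs k cc1 start
      pvA_loop cs k p.2 (endI + 1) mb.1 mb.2 p.1
  else best
termination_by cs.length - endI

def longest_substring_with_k_repetitions (string : String) (k : Int) : String :=
  String.ofList (pvA_loop string.toList k 0 0 0 [] PySem.Dict.empty)

-- ===== PORT B =====
-- inner `while cnt[ch] > k: ...` loop of B (only the just-added char can exceed k)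
def pvB_shrink (cs : List Char) (k : Int) (ch : Char) (cnt : PySem.Dict Char Int)
    (exact : Int) (start : Nat) : PySem.Dict Char Int × Int × Nat :=
  if (match PySem.Dict.get? cnt ch with
      | some v => decide (k < v)
      | none => false) then       -- Python would raise KeyError on a missing ch (never reached)
    match h1 : PySem.List.pyGet? cs (start : Int) with
    | none => (cnt, exact, start)   -- Python would raise IndexError here (never reached)
    | some s =>
      match PySem.Dict.get? cnt s with
      | none => (cnt, exact, start) -- Python would raise KeyError here (never reached)
      | some v =>
        let sc := v - 1
        let cnt1 := if sc = 0 then PySem.Dict.erase cnt s else PySem.Dict.insert cnt s sc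
        let exact1 := if sc = k then exact + 1 else if sc = k - 1 then exact - 1 else exact
        pvB_shrink cs k ch cnt1 exact1 (start + 1)
  else (cnt, exact, start)
termination_by cs.length - start
decreasing_by
  have hlt : start < cs.length := by
    by_contra hge
    rw [PySem.List.pyGet?_natCast, List.getElem?_eq_none (by omega)] at h1
    simp at h1
  omega

-- `for end, ch in enumerate(string):` loop of B, structural on the remaining chars
def pvB_loop (cs : List Char) (k : Int) (rest : List Char) (endI : Nat)
    (cnt : PySem.Dict Char Int) (exact : Int) (start bestStart bestLen : Nat) : Nat × Nat :=
  match rest with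
  | [] => (bestStart, bestLen)
  | ch :: rest' =>
    let c := PySem.Dict.getD cnt ch 0 + 1
    let cnt1 := PySem.Dict.insert cnt ch c
    let exact1 := if c = k then exact + 1 else if c = k + 1 then exact - 1 else exact
    let bb :=
      if exact1 = (PySem.Dict.size cnt1 : Int) ∧
         (bestLen : Int) < ((endI : Int) + 1) - (start : Int) then
        (start, endI + 1 - start)
      else (bestStart, bestLen)
    let p := pvB_shrink cs k ch cnt1 exact1 start
    pvB_loop cs k rest' (endI + 1) p.1 p.2.1 p.2.2 bb.1 bb.2

def longest_substring_with_k_repetitions_alt (string : String) (k : Int) : String :=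
  if k ≤ 0 then ""
  else
    let cs := string.toList
    let r := pvB_loop cs k cs 0 PySem.Dict.empty 0 0 0 0
    String.ofList (PySem.List.slice cs (some (r.1 : Int)) (some ((r.1 : Int) + (r.2 : Int))))

-- ===== PRECONDITION & SPEC =====
def Spec_longest_substring_with_k_repetitions (string : String) (k : Int) (out : String) : Prop := out = longest_substring_with_k_repetitions_alt string k
instance (string : String) (k : Int) (out : String) : Decidable (Spec_longest_substring_with_k_repetitions string k out) := by unfold Spec_longest_substring_with_k_repetitions; infer_instance

-- ===== CLAIM (what is proved, stated in full; the proofs are below) =====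
def Claim_equal_longest_substring_with_k_repetitions : Prop := ∀ (string : String) (k : Int), Dom_longest_substring_with_k_repetitions string k → Spec_longest_substring_with_k_repetitions string k (longest_substring_with_k_repetitions string k)

-- ===== LEMMAS AND PROOFS =====

-- C: membership in erase
theorem pv_mem_erase (d : PySem.Dict Char Int) (s : Char) (p : Char × Int) :
    p ∈ (d.erase s).items ↔ p ∈ d.items ∧ p.1 ≠ s := by
  simp [PySem.Dict.erase, List.mem_filter]

-- get? erase
theorem pv_get?_erase_self (d : PySem.Dict Char Int) (s : Char) :
    (d.erase s).get? s = none := by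
  simp only [PySem.Dict.erase, PySem.Dict.get?]
  rw [List.find?_eq_none.mpr]
  · rfl
  · intro p hp
    simp [List.mem_filter] at hp
    simp [hp.2]

theorem pv_get?_erase_ne (d : PySem.Dict Char Int) (s x : Char) (h : x ≠ s) :
    (d.erase s).get? x = d.get? x := by
  simp only [PySem.Dict.erase, PySem.Dict.get?]
  congr 1
  induction d.items with
  | nil => rfl
  | cons p l ih =>
    rw [List.filter_cons]
    by_cases hp : p.1 = s
    · have hpx : (p.1 == x) = false := by simp [hp, Ne.symm h]
      simp [hp, List.find?_cons, hpx, ih, Ne.symm h]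
    · by_cases hx : p.1 = x
      · simp [hp, List.find?_cons, hx, h]
      · simp [hp, List.find?_cons, hx, ih, h]

-- keys of erase are a sublist of keys
theorem pv_nodup_keys_erase (d : PySem.Dict Char Int) (s : Char)
    (h : (PySem.Dict.keys d).Nodup) : (PySem.Dict.keys (d.erase s)).Nodup := by
  apply List.Nodup.sublist _ h
  simp only [PySem.Dict.keys, PySem.Dict.erase]
  exact List.Sublist.map _ (List.filter_sublist)

-- countP under erase: removing the (unique) entry at key s
theorem pv_countP_filter_ne (P : Char × Int → Bool) :
    ∀ (l : List (Char × Int)) (s : Char) (v : Int), (s, v) ∈ l → (l.map Prod.fst).Nodup →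
    (l.filter (fun p => !p.1 == s)).countP P + (if P (s, v) then 1 else 0) = l.countP P := by
  intro l
  induction l with
  | nil => intro s v h _; simp at h
  | cons p l ih =>
    intro s v hmem hnd
    simp only [List.map_cons, List.nodup_cons] at hnd
    rcases List.mem_cons.mp hmem with heq | htl
    · cases heq.symm
      have hfl : l.filter (fun p => !p.1 == s) = l := by
        apply List.filter_eq_self.mpr
        intro a ha
        have has : a.1 ∈ l.map Prod.fst := List.mem_map.mpr ⟨a, ha, rfl⟩
        have : a.1 ≠ s := fun hc => hnd.1 (hc ▸ has)
        simp [this]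
      rw [List.filter_cons]
      norm_num [hfl, List.countP_cons]
    · have hs : s ∈ l.map Prod.fst := List.mem_map.mpr ⟨(s, v), htl, rfl⟩
      have hps : p.1 ≠ s := fun hc => hnd.1 (hc ▸ hs)
      rw [List.filter_cons]
      have hbp : (!p.1 == s) = true := by simp [hps]
      rw [hbp]
      simp only [if_true, List.countP_cons]
      have := ih s v htl hnd.2
      omega

-- countP under overwrite at key s
theorem pv_countP_overwrite (P : Char × Int → Bool) (w : Int) :
    ∀ (l : List (Char × Int)) (s : Char) (v : Int), (s, v) ∈ l → (l.map Prod.fst).Nodup →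
    ((l.map (fun p => if p.1 == s then (s, w) else p)).countP P) + (if P (s, v) then 1 else 0)
      = l.countP P + (if P (s, w) then 1 else 0) := by
  intro l
  induction l with
  | nil => intro s v h _; simp at h
  | cons p l ih =>
    intro s v hmem hnd
    simp only [List.map_cons, List.nodup_cons] at hnd
    rcases List.mem_cons.mp hmem with heq | htl
    · cases heq.symm
      have hfl : l.map (fun p => if p.1 == s then (s, w) else p) = l := by
        apply List.map_congr_left ?_ |>.trans l.map_id
        intro a ha
        have has : a.1 ∈ l.map Prod.fst := List.mem_map.mpr ⟨a, ha, rfl⟩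
        have : a.1 ≠ s := fun hc => hnd.1 (hc ▸ has)
        simp [this]
      rw [List.map_cons, hfl]
      rw [show (if ((s, v).1 == s) = true then (s, w) else (s, v)) = (s, w) from by simp]
      rw [List.countP_cons, List.countP_cons]
      omega
    · have hs : s ∈ l.map Prod.fst := List.mem_map.mpr ⟨(s, v), htl, rfl⟩
      have hps : p.1 ≠ s := fun hc => hnd.1 (hc ▸ hs)
      have hbp : (p.1 == s) = false := by simp [hps]
      rw [List.map_cons, show (if (p.1 == s) = true then (s, w) else p) = p from by rw [hbp]; simp,
        List.countP_cons, List.countP_cons]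
      have := ih s v htl hnd.2
      omega

-- getD after erase
theorem pv_getD_erase_self (d : PySem.Dict Char Int) (s : Char) :
    PySem.Dict.getD (d.erase s) s 0 = 0 := by
  rw [PySem.Dict.getD_eq_get?_getD, pv_get?_erase_self]; rfl

theorem pv_getD_erase_ne (d : PySem.Dict Char Int) (s x : Char) (h : x ≠ s) :
    PySem.Dict.getD (d.erase s) x 0 = PySem.Dict.getD d x 0 := by
  rw [PySem.Dict.getD_eq_get?_getD, pv_get?_erase_ne d s x h, ← PySem.Dict.getD_eq_get?_getD]

-- number of keys at exactly k, after an erase / overwrite / fresh insert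
theorem pv_cntk_erase (cc : PySem.Dict Char Int) (k : Int) (s0 : Char) (w : Int)
    (hm : (s0, w) ∈ cc.items) (hnd : (PySem.Dict.keys cc).Nodup) :
    ((cc.erase s0).items.countP (fun p => p.2 = k) : Int) =
      (cc.items.countP (fun p => p.2 = k) : Int) - (if w = k then 1 else 0) := by
  have hndf : (cc.items.map Prod.fst).Nodup := by simpa [PySem.Dict.keys] using hnd
  have h := pv_countP_filter_ne (fun p => decide (p.2 = k)) cc.items s0 w hm hndf
  have hitems : (cc.erase s0).items = cc.items.filter (fun p => !p.1 == s0) := rfl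
  rw [hitems]
  by_cases hwk : w = k <;> simp [hwk] at h ⊢ <;> omega

theorem pv_cntk_insert (cc : PySem.Dict Char Int) (k : Int) (s0 : Char) (w x : Int)
    (hm : (s0, w) ∈ cc.items) (hnd : (PySem.Dict.keys cc).Nodup) :
    ((cc.insert s0 x).items.countP (fun p => p.2 = k) : Int) =
      (cc.items.countP (fun p => p.2 = k) : Int) + (if x = k then 1 else 0) -
        (if w = k then 1 else 0) := by
  have hndf : (cc.items.map Prod.fst).Nodup := by simpa [PySem.Dict.keys] using hnd
  have hcont : PySem.Dict.contains cc s0 = true := by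
    rw [PySem.Dict.contains_eq_isSome_get?, PySem.Dict.get?_of_mem_items cc hm hnd]; rfl
  have h := pv_countP_overwrite (fun p => decide (p.2 = k)) x cc.items s0 w hm hndf
  rw [PySem.Dict.items_insert_of_contains cc x hcont]
  by_cases hwk : w = k <;> by_cases hxk : x = k <;> simp [hwk, hxk] at h ⊢ <;> omega

theorem pv_cntk_insert_fresh (cc : PySem.Dict Char Int) (k : Int) (s0 : Char) (x : Int)
    (hnc : PySem.Dict.contains cc s0 = false) :
    ((cc.insert s0 x).items.countP (fun p => p.2 = k) : Int) =
      (cc.items.countP (fun p => p.2 = k) : Int) + (if x = k then 1 else 0) := by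
  rw [PySem.Dict.items_insert_of_not_contains cc x hnc, List.countP_append]
  by_cases hxk : x = k <;> simp [hxk]

-- A's `any(count > k ...)` equals B's `cnt[ch] > k` when only ch can exceed k
theorem pv_cond_iff (d : PySem.Dict Char Int) (k : Int) (ch : Char)
    (hnd : (PySem.Dict.keys d).Nodup)
    (hb : ∀ p ∈ d.items, p.1 ≠ ch → p.2 ≤ k) :
    ((PySem.Dict.values d).any (fun v => decide (k < v))) =
      (match PySem.Dict.get? d ch with
       | some v => decide (k < v)
       | none => false) := by
  cases hc : PySem.Dict.get? d ch with
  | none =>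
    simp only []
    apply Bool.eq_false_iff.mpr ?_
    intro hany
    simp only [PySem.Dict.values, List.any_eq_true, List.mem_map] at hany
    obtain ⟨v, ⟨p, hp, rfl⟩, hkv⟩ := hany
    by_cases hpch : p.1 = ch
    · have : PySem.Dict.get? d ch = some p.2 := by
        have : (ch, p.2) ∈ d.items := by
          have := hp; rw [← hpch]; exact this
        exact PySem.Dict.get?_of_mem_items d this hnd
      rw [hc] at this; simp at this
    · have := hb p hp hpch
      simp at hkv; omega
  | some v =>
    simp only []
    by_cases hkv : k < v
    · have hmem : (ch, v) ∈ d.items := PySem.Dict.mem_items_of_get?_eq_some d hc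
      have : ((PySem.Dict.values d).any (fun v => decide (k < v))) = true := by
        simp only [PySem.Dict.values, List.any_eq_true, List.mem_map]
        exact ⟨v, ⟨(ch, v), hmem, rfl⟩, by simp [hkv]⟩
      rw [this]; simp [hkv]
    · rw [show (decide (k < v)) = false from by simp [hkv]]
      apply Bool.eq_false_iff.mpr
      intro hany
      simp only [PySem.Dict.values, List.any_eq_true, List.mem_map] at hany
      obtain ⟨w, ⟨p, hp, rfl⟩, hkw⟩ := hany
      simp only [decide_eq_true_eq] at hkw
      by_cases hpch : p.1 = ch
      · have : PySem.Dict.get? d ch = some p.2 := by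
          have : (ch, p.2) ∈ d.items := by have := hp; rw [← hpch]; exact this
          exact PySem.Dict.get?_of_mem_items d this hnd
        rw [hc] at this
        have hpv : v = p.2 := Option.some.inj this
        omega
      · have := hb p hp hpch; omega

-- A's `all(count == k ...)` equals B's `exact == len(cnt)`
theorem pv_allk_iff (d : PySem.Dict Char Int) (k : Int) :
    (((PySem.Dict.values d).all (fun v => decide (v = k))) = true) ↔
      ((d.items.countP (fun p => p.2 = k) : Int) = (PySem.Dict.size d : Int)) := by
  rw [show ((d.items.countP (fun p => p.2 = k) : Int) = (PySem.Dict.size d : Int)) ↔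
      (d.items.countP (fun p => p.2 = k) = d.items.length) from by
    simp [PySem.Dict.size]]
  rw [List.countP_eq_length]
  simp [PySem.Dict.values, List.all_eq_true]

-- getD positive means get? finds that value
theorem pv_get?_of_getD_ne (d : PySem.Dict Char Int) (x : Char)
    (h : PySem.Dict.getD d x 0 ≠ 0) : PySem.Dict.get? d x = some (PySem.Dict.getD d x 0) := by
  cases hc : PySem.Dict.get? d x with
  | none => exfalso; apply h; rw [PySem.Dict.getD_eq_get?_getD, hc]; rfl
  | some v => rw [PySem.Dict.getD_eq_get?_getD, hc]; rfl

-- window facts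
theorem pvW_nil (cs : List Char) (s e : Nat) (h : e ≤ s) :
    (cs.drop s).take (e - s) = [] := by
  rw [Nat.sub_eq_zero_of_le h]; rfl

theorem pvW_append (cs : List Char) (start endI : Nat) (h1 : start ≤ endI)
    (h2 : endI < cs.length) :
    (cs.drop start).take (endI + 1 - start) =
      (cs.drop start).take (endI - start) ++ [cs[endI]] := by
  rw [show endI + 1 - start = (endI - start) + 1 by omega, List.take_succ]
  congr 1
  rw [List.getElem?_drop]
  rw [show start + (endI - start) = endI by omega]
  simp [List.getElem?_eq_getElem h2]

theorem pvW_cons (cs : List Char) (start endE : Nat) (h1 : start < endE)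
    (h2 : endE ≤ cs.length) :
    (cs.drop start).take (endE - start) =
      cs[start]'(by omega) :: (cs.drop (start + 1)).take (endE - (start + 1)) := by
  rw [List.drop_eq_getElem_cons (by omega)]
  rw [show endE - start = (endE - (start + 1)) + 1 by omega]
  rfl

-- A writes 0 then deletes; B deletes directly — same dict
theorem pv_erase_insert (d : PySem.Dict Char Int) (s : Char) (h : PySem.Dict.contains d s = true) :
    (d.insert s 0).erase s = d.erase s := by
  apply PySem.Dict.ext
  simp only [PySem.Dict.erase, PySem.Dict.items_insert_of_contains d 0 h]
  induction d.items with
  | nil => rfl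
  | cons p l ih =>
    rw [List.map_cons, List.filter_cons, List.filter_cons]
    by_cases hp : p.1 = s <;> simp [hp] <;> simpa using ih

-- window count: number of occurrences of x in cs[start:endE]
def pvW (cs : List Char) (start endE : Nat) : List Char := (cs.drop start).take (endE - start)

-- the invariant tying the (shared) dict to the window cs[start:endE]
def pvInv (cs : List Char) (cc : PySem.Dict Char Int) (start endE : Nat) : Prop :=
  start ≤ endE ∧ endE ≤ cs.length ∧ (PySem.Dict.keys cc).Nodup ∧
  (∀ x : Char, PySem.Dict.getD cc x 0 = ((pvW cs start endE).count x : Int)) ∧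
  (∀ p ∈ cc.items, p.2 ≠ 0)

-- number of keys currently at exactly k
def pvCntK (cc : PySem.Dict Char Int) (k : Int) : Int :=
  (cc.items.countP (fun p => p.2 = k) : Int)

-- shrink simulation: A's rescanning shrink and B's targeted shrink walk in lockstep
theorem pv_shrink_sim (cs : List Char) (k : Int) (hk : 1 ≤ k) (ch : Char) (endE : Nat) :
    ∀ start (cc : PySem.Dict Char Int) (exact : Int),
      pvInv cs cc start endE →
      (∀ p ∈ cc.items, p.1 ≠ ch → p.2 ≤ k) →
      (∀ p ∈ cc.items, p.2 ≤ k + 1) →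
      exact = pvCntK cc k →
      pvB_shrink cs k ch cc exact start =
        ((pvA_shrink cs k cc start).1, pvCntK (pvA_shrink cs k cc start).1 k,
          (pvA_shrink cs k cc start).2) ∧
      pvInv cs (pvA_shrink cs k cc start).1 (pvA_shrink cs k cc start).2 endE ∧
      (∀ p ∈ (pvA_shrink cs k cc start).1.items, p.2 ≤ k) := by
  suffices H : ∀ (n start : Nat) (cc : PySem.Dict Char Int) (exact : Int), endE - start = n →
      pvInv cs cc start endE →
      (∀ p ∈ cc.items, p.1 ≠ ch → p.2 ≤ k) →
      (∀ p ∈ cc.items, p.2 ≤ k + 1) →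
      exact = pvCntK cc k →
      pvB_shrink cs k ch cc exact start =
        ((pvA_shrink cs k cc start).1, pvCntK (pvA_shrink cs k cc start).1 k,
          (pvA_shrink cs k cc start).2) ∧
      pvInv cs (pvA_shrink cs k cc start).1 (pvA_shrink cs k cc start).2 endE ∧
      (∀ p ∈ (pvA_shrink cs k cc start).1.items, p.2 ≤ k) by
    intro start cc exact h1 h2 h3 h4
    exact H (endE - start) start cc exact rfl h1 h2 h3 h4
  intro n
  induction n using Nat.strong_induction_on with
  | _ n IH =>
  intro start cc exact hn hInv hbnd hbnd1 hex
  obtain ⟨hse, hel, hnd, hcnt, hnz⟩ := hInv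
  rw [pvB_shrink.eq_def, pvA_shrink.eq_def, pv_cond_iff cc k ch hnd hbnd]
  cases hc : PySem.Dict.get? cc ch with
  | none =>
    simp only [Bool.false_eq_true, if_false]
    refine ⟨by rw [hex], ⟨hse, hel, hnd, hcnt, hnz⟩, ?_⟩
    intro p hp
    by_cases hpch : p.1 = ch
    · exfalso
      have hm : (ch, p.2) ∈ cc.items := by have := hp; rw [← hpch]; exact this
      have := PySem.Dict.get?_of_mem_items cc hm hnd
      rw [hc] at this
      simp at this
    · exact hbnd p hp hpch
  | some v =>
    by_cases hkv : k < v
    · -- the window must still shrink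
      simp only [hkv, decide_true, if_true]
      have hvch : PySem.Dict.getD cc ch 0 = v := by
        rw [PySem.Dict.getD_eq_get?_getD, hc]; rfl
      have hcwin : ((pvW cs start endE).count ch : Int) = v := by rw [← hcnt, hvch]
      have hlt : start < endE := by
        by_contra hge
        have : pvW cs start endE = [] := by unfold pvW; exact pvW_nil cs start endE (by omega)
        rw [this] at hcwin
        simp at hcwin
        omega
      have hsl : start < cs.length := by omega
      have hgets : PySem.List.pyGet? cs (start : Int) = some (cs[start]'hsl) := by
        rw [PySem.List.pyGet?_natCast]
        simp [List.getElem?_eq_getElem hsl]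
      -- window decomposition
      have hwin : pvW cs start endE = cs[start]'hsl :: pvW cs (start + 1) endE := by
        unfold pvW; exact pvW_cons cs start endE hlt hel
      have hcs : ((pvW cs start endE).count (cs[start]'hsl) : Int) ≥ 1 := by
        rw [hwin]
        simp
      have hgsne : PySem.Dict.getD cc (cs[start]'hsl) 0 ≠ 0 := by
        rw [hcnt]
        omega
      have hgs : PySem.Dict.get? cc (cs[start]'hsl) =
          some (PySem.Dict.getD cc (cs[start]'hsl) 0) := pv_get?_of_getD_ne cc _ hgsne
      -- reduce the two pyGet? matches (both sides share the scrutinee)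
      split
      · next h1 => exfalso; rw [hgets] at h1; simp at h1
      next s h1 =>
      rw [hgets] at h1
      cases Option.some.inj h1
      -- reduce the two get? matches
      split
      · next h2 => exfalso; rw [hgs] at h2; simp at h2
      next w2 h2 =>
      rw [hgs] at h2
      cases Option.some.inj h2
      set s0 := cs[start]'hsl with hs0
      set w := PySem.Dict.getD cc s0 0 with hw
      have hwpos : 1 ≤ w := by rw [hw, hcnt]; omega
      have hmem : (s0, w) ∈ cc.items := PySem.Dict.mem_items_of_get?_eq_some cc hgs
      have hwk1 : w ≤ k + 1 := hbnd1 _ hmem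
      have hcont : PySem.Dict.contains cc s0 = true := by
        rw [PySem.Dict.contains_eq_isSome_get?, hgs]; rfl
      have hw1k : w - 1 ≤ k := by omega
      -- A's insert-then-erase equals B's direct erase
      have hD : (if w - 1 = 0 then (cc.insert s0 (w - 1)).erase s0 else cc.insert s0 (w - 1)) =
          (if w - 1 = 0 then cc.erase s0 else cc.insert s0 (w - 1)) := by
        by_cases hw0 : w - 1 = 0
        · rw [if_pos hw0, if_pos hw0, hw0, pv_erase_insert cc s0 hcont]
        · rw [if_neg hw0, if_neg hw0]
      rw [hD]
      set cc2 := if w - 1 = 0 then cc.erase s0 else cc.insert s0 (w - 1) with hcc2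
      set ex2 := if w - 1 = k then exact + 1 else if w - 1 = k - 1 then exact - 1 else exact with hex2
      -- the updated exact counter is correct
      have hex2' : ex2 = pvCntK cc2 k := by
        rw [hex2, hcc2, hex]
        unfold pvCntK
        by_cases hw0 : w - 1 = 0
        · rw [if_pos hw0, pv_cntk_erase cc k s0 w hmem hnd]
          split_ifs <;> omega
        · rw [if_neg hw0, pv_cntk_insert cc k s0 w (w - 1) hmem hnd]
          split_ifs <;> omega
      -- invariant for the shrunk window
      have hcnt1 : ∀ x : Char, ((pvW cs start endE).count x : Int) =
          ((pvW cs (start + 1) endE).count x : Int) + (if s0 = x then 1 else 0) := by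
        intro x
        rw [hwin, List.count_cons]
        by_cases hx : s0 = x <;> simp [hx]
      have hInv2 : pvInv cs cc2 (start + 1) endE := by
        refine ⟨by omega, hel, ?_, ?_, ?_⟩
        · rw [hcc2]
          by_cases hw0 : w - 1 = 0
          · rw [if_pos hw0]; exact pv_nodup_keys_erase cc s0 hnd
          · rw [if_neg hw0]; exact PySem.Dict.nodup_keys_insert cc s0 (w - 1) hnd
        · intro x
          have hx0 := hcnt x
          have hx1 := hcnt1 x
          have hws : w = ((pvW cs start endE).count s0 : Int) := by rw [hw, hcnt s0]
          rw [hcc2]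
          by_cases hx : x = s0
          · subst hx
            rw [if_pos rfl] at hx1
            by_cases hw0 : w - 1 = 0
            · rw [if_pos hw0, pv_getD_erase_self]
              omega
            · rw [if_neg hw0, PySem.Dict.getD_insert, if_pos rfl]
              omega
          · have hsx : ¬ s0 = x := fun hc => hx hc.symm
            rw [if_neg hsx] at hx1
            by_cases hw0 : w - 1 = 0
            · rw [if_pos hw0, pv_getD_erase_ne cc s0 x hx, hx0]
              omega
            · rw [if_neg hw0, PySem.Dict.getD_insert, if_neg hx, hx0]
              omega
        · intro p hp
          rw [hcc2] at hp
          by_cases hw0 : w - 1 = 0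
          · rw [if_pos hw0] at hp
            exact hnz p ((pv_mem_erase cc s0 p).mp hp).1
          · rw [if_neg hw0] at hp
            rcases (PySem.Dict.mem_items_insert cc s0 (w - 1) p).mp hp with rfl | ⟨hpm, _⟩
            · exact hw0
            · exact hnz p hpm
      have hbnd2 : ∀ p ∈ cc2.items, p.1 ≠ ch → p.2 ≤ k := by
        intro p hp hpch
        rw [hcc2] at hp
        by_cases hw0 : w - 1 = 0
        · rw [if_pos hw0] at hp
          exact hbnd p ((pv_mem_erase cc s0 p).mp hp).1 hpch
        · rw [if_neg hw0] at hp
          rcases (PySem.Dict.mem_items_insert cc s0 (w - 1) p).mp hp with rfl | ⟨hpm, _⟩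
          · exact hw1k
          · exact hbnd p hpm hpch
      have hbnd12 : ∀ p ∈ cc2.items, p.2 ≤ k + 1 := by
        intro p hp
        rw [hcc2] at hp
        by_cases hw0 : w - 1 = 0
        · rw [if_pos hw0] at hp
          exact hbnd1 p ((pv_mem_erase cc s0 p).mp hp).1
        · rw [if_neg hw0] at hp
          rcases (PySem.Dict.mem_items_insert cc s0 (w - 1) p).mp hp with rfl | ⟨hpm, _⟩
          · omega
          · exact hbnd1 p hpm
      exact IH (endE - (start + 1)) (by omega) (start + 1) cc2 ex2 rfl hInv2 hbnd2 hbnd12 hex2'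
    · simp only [hkv, decide_false, Bool.false_eq_true, if_false]
      refine ⟨by rw [hex], ⟨hse, hel, hnd, hcnt, hnz⟩, ?_⟩
      intro p hp
      by_cases hpch : p.1 = ch
      · have hm : (ch, p.2) ∈ cc.items := by have := hp; rw [← hpch]; exact this
        have := PySem.Dict.get?_of_mem_items cc hm hnd
        rw [hc] at this
        have := Option.some.inj this
        omega
      · exact hbnd p hp hpch

-- outer simulation
theorem pv_loop_sim (cs : List Char) (k : Int) (hk : 1 ≤ k) :
    ∀ (rest : List Char) (endI start bestStart bestLen : Nat) (cc : PySem.Dict Char Int)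
      (exact maxLen : Int) (bestA : List Char),
      cs.drop endI = rest →
      pvInv cs cc start endI →
      (∀ p ∈ cc.items, p.2 ≤ k) →
      exact = pvCntK cc k →
      maxLen = (bestLen : Int) →
      bestA = (cs.drop bestStart).take bestLen →
      pvA_loop cs k start endI maxLen bestA cc =
        (cs.drop (pvB_loop cs k rest endI cc exact start bestStart bestLen).1).take
          (pvB_loop cs k rest endI cc exact start bestStart bestLen).2 := by
  intro rest
  induction rest with
  | nil =>
    intro endI start bestStart bestLen cc exact maxLen bestA hdrop hInv hLe hex hml hba
    have hge : ¬ endI < cs.length := by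
      have := congrArg List.length hdrop
      simp at this
      omega
    rw [pvA_loop.eq_def]
    simp only [pvB_loop, hge, dite_false]
    exact hba
  | cons ch rest' ih =>
    intro endI start bestStart bestLen cc exact maxLen bestA hdrop hInv hLe hex hml hba
    obtain ⟨hse, hel, hnd, hcnt, hnz⟩ := hInv
    have hlen := congrArg List.length hdrop
    simp at hlen
    have hlt : endI < cs.length := by omega
    have hget : cs[endI]? = some ch := by
      have h0 : (cs.drop endI)[0]? = some ch := by rw [hdrop]; rfl
      rw [List.getElem?_drop] at h0
      simpa using h0
    have hgetE : cs[endI]'hlt = ch := by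
      have := hget
      rw [List.getElem?_eq_getElem hlt] at this
      exact Option.some.inj this
    have hdrop' : cs.drop (endI + 1) = rest' := by
      rw [← List.tail_drop, hdrop]
      rfl
    -- shared first step: cc1 is the same dict on both sides
    set old := PySem.Dict.getD cc ch 0 with hold
    set cc1 := cc.insert ch (old + 1) with hcc1
    have holdc : old = ((pvW cs start endI).count ch : Int) := by rw [hold, hcnt]
    have holdnn : 0 ≤ old := by rw [holdc]; positivity
    -- window extension
    have hwapp : pvW cs start (endI + 1) = pvW cs start endI ++ [ch] := by
      unfold pvW
      rw [pvW_append cs start endI hse hlt, hgetE]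
    have hwcnt : ∀ x : Char, ((pvW cs start (endI + 1)).count x : Int) =
        ((pvW cs start endI).count x : Int) + (if ch = x then 1 else 0) := by
      intro x
      rw [hwapp, List.count_append]
      by_cases hx : ch = x <;> simp [hx]
    -- old value bound
    have holdk : old ≤ k := by
      rcases hcont : PySem.Dict.contains cc ch with _ | _
      · rw [hold, PySem.Dict.getD_of_not_contains cc 0 hcont]
        omega
      · have hgv : PySem.Dict.get? cc ch = some old := by
          rw [PySem.Dict.contains_eq_isSome_get?] at hcont
          cases hgc : PySem.Dict.get? cc ch with
          | none => rw [hgc] at hcont; simp at hcont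
          | some v => rw [hold, PySem.Dict.getD_eq_get?_getD, hgc]; rfl
        exact hLe (ch, old) (PySem.Dict.mem_items_of_get?_eq_some cc hgv)
    -- the incremented exact counter is pvCntK cc1
    have hex1 : (if old + 1 = k then exact + 1
        else if old + 1 = k + 1 then exact - 1 else exact) = pvCntK cc1 k := by
      rw [hex, hcc1]
      unfold pvCntK
      rcases hcont : PySem.Dict.contains cc ch with _ | _
      · have h0 : old = 0 := by rw [hold, PySem.Dict.getD_of_not_contains cc 0 hcont]
        rw [pv_cntk_insert_fresh cc k ch (old + 1) hcont]
        split_ifs <;> omega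
      · have hgv : PySem.Dict.get? cc ch = some old := by
          rw [PySem.Dict.contains_eq_isSome_get?] at hcont
          cases hgc : PySem.Dict.get? cc ch with
          | none => rw [hgc] at hcont; simp at hcont
          | some v => rw [hold, PySem.Dict.getD_eq_get?_getD, hgc]; rfl
        rw [pv_cntk_insert cc k ch old (old + 1)
          (PySem.Dict.mem_items_of_get?_eq_some cc hgv) hnd]
        split_ifs <;> omega
    -- invariant after the insert, for window [start, endI+1)
    have hInv1 : pvInv cs cc1 start (endI + 1) := by
      refine ⟨by omega, by omega, PySem.Dict.nodup_keys_insert cc ch (old + 1) hnd, ?_, ?_⟩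
      · intro x
        rw [hcc1, PySem.Dict.getD_insert, hwcnt x]
        by_cases hx : x = ch
        · subst hx
          rw [if_pos rfl, if_pos rfl, ← hcnt, ← hold]
        · rw [if_neg hx, if_neg (fun hc => hx hc.symm), hcnt]
          omega
      · intro p hp
        rw [hcc1] at hp
        rcases (PySem.Dict.mem_items_insert cc ch (old + 1) p).mp hp with rfl | ⟨hpm, _⟩
        · simp; omega
        · exact hnz p hpm
    have hbndA : ∀ p ∈ cc1.items, p.1 ≠ ch → p.2 ≤ k := by
      intro p hp hpch
      rw [hcc1] at hp
      rcases (PySem.Dict.mem_items_insert cc ch (old + 1) p).mp hp with rfl | ⟨hpm, _⟩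
      · exact absurd rfl hpch
      · exact hLe p hpm
    have hbndB : ∀ p ∈ cc1.items, p.2 ≤ k + 1 := by
      intro p hp
      rw [hcc1] at hp
      rcases (PySem.Dict.mem_items_insert cc ch (old + 1) p).mp hp with rfl | ⟨hpm, _⟩
      · simp; omega
      · have := hLe p hpm; omega
    -- the shrink walks in lockstep
    obtain ⟨hB, hInv', hLe'⟩ :=
      pv_shrink_sim cs k hk ch (endI + 1) start cc1
        (if old + 1 = k then exact + 1 else if old + 1 = k + 1 then exact - 1 else exact)
        hInv1 hbndA hbndB hex1
    -- unfold one step of both loops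
    rw [pvA_loop.eq_def]
    simp only [pvB_loop, hlt, dite_true, PySem.List.pyGet?_natCast, hget]
    simp only [← hold, ← hcc1]
    rw [hB]
    -- the recorded best: A's all() check equals B's exact == len(cnt) check
    by_cases hall : pvCntK cc1 k = (PySem.Dict.size cc1 : Int)
    · have hallb : ((PySem.Dict.values cc1).all (fun v => decide (v = k))) = true := by
        rw [pv_allk_iff cc1 k]
        exact hall
      rw [hallb]
      simp only [if_true]
      by_cases hlen2 : (bestLen : Int) < (endI : Int) + 1 - (start : Int)
      · rw [if_pos (show maxLen < (endI : Int) + 1 - (start : Int) by rw [hml]; exact hlen2),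
          if_pos (by rw [hex1]; exact ⟨hall, hlen2⟩)]
        refine ih (endI + 1) _ start (endI + 1 - start) _ _ _ _ hdrop' hInv'
          (fun p hp => hLe' p hp) rfl (by push_cast; omega) ?_
        rw [show ((endI : Int) + 1) = ((endI + 1 : Nat) : Int) by push_cast; ring,
          PySem.List.slice_natCast]
      · rw [if_neg (show ¬ maxLen < (endI : Int) + 1 - (start : Int) by rw [hml]; exact hlen2),
          if_neg (by rw [hex1]; exact fun hc => hlen2 hc.2)]
        exact ih (endI + 1) _ bestStart bestLen _ _ _ _ hdrop' hInv'
          (fun p hp => hLe' p hp) rfl hml hba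
    · have hallb : ((PySem.Dict.values cc1).all (fun v => decide (v = k))) = false := by
        rw [← Bool.not_eq_true, pv_allk_iff cc1 k]
        exact hall
      rw [hallb]
      simp only [Bool.false_eq_true, if_false]
      rw [if_neg (by rw [hex1]; exact fun hc => hall hc.1)]
      exact ih (endI + 1) _ bestStart bestLen _ _ _ _ hdrop' hInv'
        (fun p hp => hLe' p hp) rfl hml hba

-- shrink is a no-op when no count exceeds k
theorem pvA_shrink_of_no_over (cs : List Char) (k : Int) (d : PySem.Dict Char Int) (st : Nat)
    (h : ((PySem.Dict.values d).any (fun v => decide (k < v))) = false) :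
    pvA_shrink cs k d st = (d, st) := by
  rw [pvA_shrink.eq_def, h]
  simp

-- the k ≤ 0 case: A's window empties at every step and nothing is ever recorded
theorem pv_loop_nonpos (cs : List Char) (k : Int) (hk : k ≤ 0) :
    ∀ (rest : List Char) (endI : Nat) (maxLen : Int) (best : List Char),
      cs.drop endI = rest →
      pvA_loop cs k endI endI maxLen best PySem.Dict.empty = best := by
  intro rest
  induction rest with
  | nil =>
    intro endI ml best hdrop
    have hge : ¬ endI < cs.length := by
      have := congrArg List.length hdrop
      simp at this
      omega
    rw [pvA_loop.eq_def]
    simp [hge]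
  | cons ch rest' ih =>
    intro endI ml best hdrop
    have hlen := congrArg List.length hdrop
    simp at hlen
    have hlt : endI < cs.length := by omega
    have hget : cs[endI]? = some ch := by
      have h0 : (cs.drop endI)[0]? = some ch := by rw [hdrop]; rfl
      rw [List.getElem?_drop] at h0
      simpa using h0
    have hdrop' : cs.drop (endI + 1) = rest' := by
      rw [← List.tail_drop, hdrop]
      rfl
    rw [pvA_loop.eq_def]
    simp only [hlt, dite_true, PySem.List.pyGet?_natCast, hget]
    have hcc1 : ∀ d : PySem.Dict Char Int, d = PySem.Dict.empty →
        d.insert ch (d.getD ch 0 + 1) = PySem.Dict.mk [(ch, 1)] := by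
      rintro d rfl
      apply PySem.Dict.ext
      simp [PySem.Dict.empty, PySem.Dict.insert, PySem.Dict.contains, PySem.Dict.getD,
        PySem.Dict.get?]
    rw [hcc1 PySem.Dict.empty rfl]
    have hall : ((PySem.Dict.values (PySem.Dict.mk [(ch, 1)])).all (fun v => decide (v = k))) = false := by
      simp [PySem.Dict.values]
      omega
    rw [hall]
    have hshr : pvA_shrink cs k (PySem.Dict.mk [(ch, 1)]) endI = (PySem.Dict.empty, endI + 1) := by
      rw [pvA_shrink.eq_def]
      have hany : ((PySem.Dict.values (PySem.Dict.mk [(ch, 1)])).any (fun v => decide (k < v))) = true := by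
        simp [PySem.Dict.values]
        omega
      rw [hany]
      simp only [if_true]
      split
      · next h1 => exfalso; rw [PySem.List.pyGet?_natCast, hget] at h1; simp at h1
      next s h1 =>
      rw [PySem.List.pyGet?_natCast, hget] at h1
      cases Option.some.inj h1
      simp only [PySem.Dict.get?, List.find?, beq_self_eq_true, Option.map_some]
      rw [pvA_shrink_of_no_over]
      · refine congrArg (fun d => (d, endI + 1)) ?_
        apply PySem.Dict.ext
        norm_num [PySem.Dict.insert, PySem.Dict.erase, PySem.Dict.contains, PySem.Dict.empty]
      · norm_num [PySem.Dict.values, PySem.Dict.insert, PySem.Dict.erase, PySem.Dict.contains]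
    rw [hshr]
    exact ih (endI + 1) ml best hdrop'

-- ===== VERDICT (by name: the statement is the Claim_ definition above) =====
theorem longest_substring_with_k_repetitions_spec : Claim_equal_longest_substring_with_k_repetitions := by
  intro s k _
  unfold Spec_longest_substring_with_k_repetitions
  unfold longest_substring_with_k_repetitions longest_substring_with_k_repetitions_alt
  by_cases hk : k ≤ 0
  · rw [if_pos hk, pv_loop_nonpos s.toList k hk (s.toList.drop 0) 0 0 [] rfl]
  · have hk1 : 1 ≤ k := by omega
    simp only [hk, if_neg, if_false]
    rw [pv_loop_sim s.toList k hk1 s.toList 0 0 0 0 PySem.Dict.empty 0 0 [] rfl]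
    · congr 1
      rw [show ((pvB_loop s.toList k s.toList 0 PySem.Dict.empty 0 0 0 0).1 : Int) +
            ((pvB_loop s.toList k s.toList 0 PySem.Dict.empty 0 0 0 0).2 : Int) =
            (((pvB_loop s.toList k s.toList 0 PySem.Dict.empty 0 0 0 0).1 +
              (pvB_loop s.toList k s.toList 0 PySem.Dict.empty 0 0 0 0).2 : Nat) : Int) by push_cast; ring]
      rw [PySem.List.slice_natCast]
      simp
    · exact ⟨Nat.le_refl 0, Nat.zero_le _, by simp [PySem.Dict.keys, PySem.Dict.empty],
        by intro x; simp [PySem.Dict.getD, PySem.Dict.get?, PySem.Dict.empty, pvW],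
        by simp [PySem.Dict.empty]⟩
    · simp [PySem.Dict.empty]
    · simp [pvCntK, PySem.Dict.empty]
    · simp
    · simp
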